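-- pv_equiv track=rewrite | github.com/VishalChak/workspace_python | code_practice/permutationSequence.py | next_big
-- ===== SOURCE A (Python) =====
-- def next_big(y, a):
--     y.sort()
--     for i in range(len(y)):
--         val = y[i]
--         if val> a:
--             y[i] = a
--             a = val
--             return y, a
-- ===== SOURCE B (Python) =====
-- def next_big(y, a):
--     y.sort()
--     # binary search (bisect_right by hand: stdlib bisect not imported by the
--     # original module) for the first element strictly greater than a
--     lo, hi = 0, len(y)
--     while lo < hi:
--         mid = (lo + hi) // 2
--         if y[mid] <= a:
--             lo = mid + 1
--         else:
--             hi = mid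
--     if lo < len(y):
--         old = y[lo]
--         y[lo] = a
--         return y, old
-- ===== Notes on version B (the rewrite author's own statement) =====
-- stated objective: alternative
-- what changed: After the same in-place sort, B finds the first element strictly greater than a by a hand-written bisect_right binary search instead of A's linear early-return scan, then does one conditional swap.
import Mathlib
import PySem

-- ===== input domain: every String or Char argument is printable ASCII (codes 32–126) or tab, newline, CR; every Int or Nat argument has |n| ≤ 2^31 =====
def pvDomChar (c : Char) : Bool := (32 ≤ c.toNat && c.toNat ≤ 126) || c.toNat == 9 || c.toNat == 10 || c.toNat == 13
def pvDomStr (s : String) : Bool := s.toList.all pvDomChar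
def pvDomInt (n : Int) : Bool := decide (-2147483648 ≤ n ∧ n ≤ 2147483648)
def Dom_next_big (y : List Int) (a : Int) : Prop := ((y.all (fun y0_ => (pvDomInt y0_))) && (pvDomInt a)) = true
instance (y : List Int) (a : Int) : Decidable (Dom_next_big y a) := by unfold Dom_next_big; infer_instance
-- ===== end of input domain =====

-- B replaces A's linear early-return scan of the sorted list by a hand-written bisect_right
-- binary search (alternative algorithm, same cost class; equivalence proved on return values —
-- both Pythons mutate y in place the same way: sort plus at most one assignment).

-- ===== PORT A =====
-- the 'for i in range(len(y))' loop with its early return, as index recursion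
def nextBigGo (y : List Int) (a : Int) (i : Nat) : Option (List Int × Int) :=
  if h : i < y.length then
    let val := y[i]
    if val > a then some (y.set i a, val) else nextBigGo y a (i + 1)
  else none
termination_by y.length - i

def next_big (y : List Int) (a : Int) : Option (List Int × Int) :=
  let s := PySem.List.sorted y (fun v => v)   -- y.sort()
  nextBigGo s a 0

-- ===== PORT B =====
-- the 'while lo < hi' bisect_right loop; y[mid] is always in range (lo ≤ mid < hi ≤ len),
-- so getD with an unused default is exact
def bisectGo (s : List Int) (a : Int) (lo hi : Nat) : Nat :=
  if lo < hi then
    let mid := (lo + hi) / 2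
    if s.getD mid 0 ≤ a then bisectGo s a (mid + 1) hi else bisectGo s a lo mid
  else lo
termination_by hi - lo
decreasing_by all_goals omega

def next_big_alt (y : List Int) (a : Int) : Option (List Int × Int) :=
  let s := PySem.List.sorted y (fun v => v)   -- y.sort()
  let lo := bisectGo s a 0 s.length
  if h : lo < s.length then
    let old := s[lo]
    some (s.set lo a, old)
  else none

-- ===== PRECONDITION & SPEC =====
def Spec_next_big (y : List Int) (a : Int) (out : Option (List Int × Int)) : Prop := out = next_big_alt y a
instance (y : List Int) (a : Int) (out : Option (List Int × Int)) : Decidable (Spec_next_big y a out) := by unfold Spec_next_big; infer_instance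

-- ===== CLAIM (what is proved, stated in full; the proofs are below) =====
def Claim_equal_next_big : Prop := ∀ (y : List Int) (a : Int), Dom_next_big y a → Spec_next_big y a (next_big y a)

-- ===== LEMMAS AND PROOFS =====

-- A's scan, started at any i ≤ k, lands exactly on k whenever k is "the first index past the ≤ a prefix"
lemma goA_of_isK (s : List Int) (a : Int) (k : Nat)
    (hk1 : k ≤ s.length)
    (hk2 : ∀ j (hj : j < s.length), j < k → s[j] ≤ a)
    (hk3 : ∀ (h : k < s.length), a < s[k]) :
    ∀ i, i ≤ k → nextBigGo s a i =
      if h : k < s.length then some (s.set k a, s[k]) else none := by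
  suffices H : ∀ n i, i ≤ k → k - i = n →
      nextBigGo s a i = if h : k < s.length then some (s.set k a, s[k]) else none by
    intro i hik; exact H (k - i) i hik rfl
  intro n
  induction n with
  | zero =>
    intro i hik hn
    have hik' : i = k := by omega
    subst hik'
    rw [nextBigGo]
    by_cases h : i < s.length
    · have := hk3 h
      simp [h, this]
    · simp [h]
  | succ n ih =>
    intro i hik hn
    have hilt : i < k := by omega
    have hlen : i < s.length := by omega
    rw [nextBigGo]
    have hle : s[i] ≤ a := hk2 i hlen hilt
    have : ¬ (s[i] > a) := by omega
    simp only [hlen, dite_true, this, if_false]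
    exact ih (i + 1) (by omega) (by omega)

-- the binary search returns the same "first index past the ≤ a prefix" on a sorted list
lemma bisectGo_isK (s : List Int) (a : Int)
    (hs : s.Pairwise (fun x1 x2 => x1 ≤ x2)) :
    ∀ n lo hi, hi - lo = n → lo ≤ hi → hi ≤ s.length →
    (∀ j (hj : j < s.length), j < lo → s[j] ≤ a) →
    (∀ j (hj : j < s.length), hi ≤ j → a < s[j]) →
      bisectGo s a lo hi ≤ s.length ∧
      (∀ j (hj : j < s.length), j < bisectGo s a lo hi → s[j] ≤ a) ∧
      (∀ (h : bisectGo s a lo hi < s.length), a < s[bisectGo s a lo hi]) := by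
  intro n
  induction n using Nat.strong_induction_on with
  | _ n ih =>
    intro lo hi hn hlohi hhi hleft hright
    by_cases hlt : lo < hi
    · have hmidlt : (lo + hi) / 2 < hi := by omega
      have hmidge : lo ≤ (lo + hi) / 2 := by omega
      have hmidlen : (lo + hi) / 2 < s.length := by omega
      have hget : s.getD ((lo + hi) / 2) 0 = s[(lo + hi) / 2] :=
        List.getD_eq_getElem s 0 hmidlen
      rw [bisectGo]
      simp only [hlt, if_true, hget]
      by_cases hcmp : s[(lo + hi) / 2] ≤ a
      · simp only [hcmp, if_true]
        refine ih (hi - ((lo + hi) / 2 + 1)) (by omega) ((lo + hi) / 2 + 1) hi rfl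
          (by omega) hhi ?_ hright
        intro j hj hjlt
        rcases Nat.lt_or_ge j lo with hc | hc
        · exact hleft j hj hc
        · rcases Nat.lt_or_ge j ((lo + hi) / 2) with hc2 | hc2
          · have := (List.pairwise_iff_getElem.mp hs) j ((lo + hi) / 2) hj hmidlen hc2
            omega
          · have hj' : j = (lo + hi) / 2 := by omega
            subst hj'; exact hcmp
      · simp only [hcmp, if_false]
        refine ih ((lo + hi) / 2 - lo) (by omega) lo ((lo + hi) / 2) rfl
          (by omega) (by omega) hleft ?_
        intro j hj hjge
        rcases Nat.lt_or_ge ((lo + hi) / 2) j with hc | hc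
        · have := (List.pairwise_iff_getElem.mp hs) ((lo + hi) / 2) j hmidlen hj hc
          omega
        · have hj' : j = (lo + hi) / 2 := by omega
          subst hj'; omega
    · rw [bisectGo]
      simp only [hlt, if_false]
      exact ⟨by omega, fun j hj hjlt => hleft j hj (by omega),
        fun h => hright lo h (by omega)⟩

-- ===== VERDICT (by name: the statement is the Claim_ definition above) =====
theorem next_big_spec : Claim_equal_next_big := by
  intro y a _
  unfold Spec_next_big next_big next_big_alt
  have hp : (PySem.List.sorted y (fun v => v)).Pairwise (fun x1 x2 => x1 ≤ x2) :=
    PySem.List.sorted_pairwise y (fun v => v)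
  obtain ⟨hk1, hk2, hk3⟩ :=
    bisectGo_isK (PySem.List.sorted y (fun v => v)) a hp
      ((PySem.List.sorted y (fun v => v)).length - 0) 0
      (PySem.List.sorted y (fun v => v)).length rfl (Nat.zero_le _) le_rfl
      (by intro j hj hj0; omega)
      (by intro j hj hle; omega)
  exact goA_of_isK _ a _ hk1 hk2 hk3 0 (Nat.zero_le _)
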